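-- pv_equiv track=rewrite | github.com/Jake-404/clipstack-core | services/output-moderation/main.py | _verdict_for
-- ===== SOURCE A (Python) =====
-- from typing import Literal
--
-- SafetyCategory = Literal[
--     "S1_violent_crimes",
--     "S2_non_violent_crimes",
--     "S3_sex_related_crimes",
--     "S4_child_sexual_exploitation",
--     "S5_defamation",
--     "S6_specialized_advice",            # legal / medical / financial without disclaimer
--     "S7_privacy",                       # PII or sensitive personal info
--     "S8_intellectual_property",
--     "S9_indiscriminate_weapons",        # CBRN
--     "S10_hate",
--     "S11_suicide_self_harm",
--     "S12_sexual_content",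
--     "S13_elections",                    # voting misinformation
--     "S14_code_interpreter_abuse",
-- ]
--
-- Verdict = Literal["pass", "flag", "block"]
--
-- _DEFAULT_BLOCK: frozenset[SafetyCategory] = frozenset({
--     "S1_violent_crimes",
--     "S2_non_violent_crimes",
--     "S3_sex_related_crimes",
--     "S4_child_sexual_exploitation",
--     "S9_indiscriminate_weapons",
--     "S10_hate",
--     "S11_suicide_self_harm",
-- })
--
-- def _verdict_for(
--     findings: list[SafetyCategory],
--     block_override: list[SafetyCategory] | None,
--     flag_override: list[SafetyCategory] | None,
-- ) -> Verdict:
--     """Apply workspace policy on top of Llama Guard's category list.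
--
--     Precedence:
--       1. workspace block_override — these escalate to block
--       2. workspace flag_override  — these demote to flag (overrides default block)
--       3. _DEFAULT_BLOCK           — categories that block unless demoted
--       4. otherwise                — flag
--
--     Worst-case wins: if any finding triggers block, the verdict is block.
--     """
--     if not findings:
--         return "pass"
--
--     block_set = set(block_override or [])
--     flag_set = set(flag_override or [])
--     worst: Verdict = "pass"
--     for cat in findings:
--         if cat in block_set:
--             return "block"  # explicit workspace block — short-circuit
--         if cat in flag_set:
--             verdict_for_cat: Verdict = "flag"
--         elif cat in _DEFAULT_BLOCK:
--             verdict_for_cat = "block"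
--         else:
--             verdict_for_cat = "flag"
--
--         if verdict_for_cat == "block":
--             return "block"
--         if verdict_for_cat == "flag" and worst == "pass":
--             worst = "flag"
--     return worst
-- ===== SOURCE B (Python) =====
-- _DEFAULT_BLOCK = frozenset({
--     "S1_violent_crimes",
--     "S2_non_violent_crimes",
--     "S3_sex_related_crimes",
--     "S4_child_sexual_exploitation",
--     "S9_indiscriminate_weapons",
--     "S10_hate",
--     "S11_suicide_self_harm",
-- })
--
-- def _verdict_for(findings, block_override, flag_override):
--     # Set-algebra formulation: build the effective blocking set once via
--     # union/difference, then a single set intersection decides the verdict.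
--     if not findings:
--         return "pass"
--     blocking = set(block_override or []) | (_DEFAULT_BLOCK - set(flag_override or []))
--     return "block" if set(findings) & blocking else "flag"
-- ===== Notes on version B (the rewrite author's own statement) =====
-- stated objective: alternative
-- what changed: A's per-element accumulator loop with three early returns and per-category branching is replaced by set algebra: the effective blocking set is computed once as block_set | (_DEFAULT_BLOCK - flag_set), and one set intersection with the findings decides block vs flag.
import Mathlib
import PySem

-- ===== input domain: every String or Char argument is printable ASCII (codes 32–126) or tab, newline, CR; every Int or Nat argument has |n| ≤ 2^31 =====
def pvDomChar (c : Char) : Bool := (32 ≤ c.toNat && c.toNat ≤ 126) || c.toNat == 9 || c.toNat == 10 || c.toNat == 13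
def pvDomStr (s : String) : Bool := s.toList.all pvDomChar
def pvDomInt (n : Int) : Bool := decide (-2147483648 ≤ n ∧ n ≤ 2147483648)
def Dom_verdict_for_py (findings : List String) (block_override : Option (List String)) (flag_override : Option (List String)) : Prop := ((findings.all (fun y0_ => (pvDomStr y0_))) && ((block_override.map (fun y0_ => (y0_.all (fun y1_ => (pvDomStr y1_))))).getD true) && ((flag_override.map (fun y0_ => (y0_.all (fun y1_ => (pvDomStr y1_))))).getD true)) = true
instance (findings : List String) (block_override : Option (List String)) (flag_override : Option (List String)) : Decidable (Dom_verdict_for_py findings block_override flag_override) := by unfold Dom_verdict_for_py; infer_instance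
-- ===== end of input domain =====

-- B replaces A's accumulator loop with early returns by set algebra: one effective
-- blocking set built by union/difference, then a single intersection test (objective:
-- alternative); return values are identical.

-- ===== PORT A =====
-- _DEFAULT_BLOCK (a frozenset literal of distinct strings; only membership is used)
def pvDefaultBlock : List String :=
  ["S1_violent_crimes", "S2_non_violent_crimes", "S3_sex_related_crimes",
   "S4_child_sexual_exploitation", "S9_indiscriminate_weapons", "S10_hate",
   "S11_suicide_self_harm"]

-- the 'for cat in findings' loop of A, with accumulator 'worst' and early returns
def pvLoopA (bs fs : PySem.Set String) (worst : String) : List String → String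
  | [] => worst
  | cat :: rest =>
    if PySem.Set.contains bs cat then "block"
    else
      let verdict_for_cat : String :=
        if PySem.Set.contains fs cat then "flag"
        else if pvDefaultBlock.contains cat then "block"
        else "flag"
      if verdict_for_cat = "block" then "block"
      else if verdict_for_cat = "flag" ∧ worst = "pass" then pvLoopA bs fs "flag" rest
      else pvLoopA bs fs worst rest

def verdict_for_py (findings : List String) (block_override : Option (List String)) (flag_override : Option (List String)) : String :=
  if findings = [] then "pass"
  else
    let block_set : PySem.Set String := PySem.Set.ofList (block_override.getD [])
    let flag_set : PySem.Set String := PySem.Set.ofList (flag_override.getD [])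
    pvLoopA block_set flag_set "pass" findings

-- ===== PORT B =====
def verdict_for_py_alt (findings : List String) (block_override : Option (List String)) (flag_override : Option (List String)) : String :=
  if findings = [] then "pass"
  else
    -- blocking = set(block_override or []) | (_DEFAULT_BLOCK - set(flag_override or []))
    let blocking : PySem.Set String :=
      PySem.Set.union (PySem.Set.ofList (block_override.getD []))
        (PySem.Set.diff (PySem.Set.ofList pvDefaultBlock)
          (PySem.Set.ofList (flag_override.getD [])))
    -- "block" if set(findings) & blocking else "flag"  (truthiness = nonempty)
    if PySem.Set.inter (PySem.Set.ofList findings) blocking ≠ [] then "block" else "flag"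

-- ===== PRECONDITION & SPEC =====
def Spec_verdict_for_py (findings : List String) (block_override : Option (List String)) (flag_override : Option (List String)) (out : String) : Prop := out = verdict_for_py_alt findings block_override flag_override
instance (findings : List String) (block_override : Option (List String)) (flag_override : Option (List String)) (out : String) : Decidable (Spec_verdict_for_py findings block_override flag_override out) := by unfold Spec_verdict_for_py; infer_instance

-- ===== CLAIM =====
def Claim_equal_verdict_for_py : Prop := ∀ (findings : List String) (block_override : Option (List String)) (flag_override : Option (List String)), Dom_verdict_for_py findings block_override flag_override → Spec_verdict_for_py findings block_override flag_override (verdict_for_py findings block_override flag_override)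

-- ===== LEMMAS AND PROOFS =====

-- A's loop started with worst ∈ {"pass","flag"} returns "block" iff some finding is
-- blocking; otherwise "flag" on nonempty input (its accumulator never goes past "flag").
theorem pvLoopA_eq (bs fs : PySem.Set String) (l : List String) :
    ∀ worst : String, worst = "pass" ∨ worst = "flag" →
    pvLoopA bs fs worst l =
      if l.any (fun cat =>
          PySem.Set.contains bs cat ||
          (pvDefaultBlock.contains cat && !PySem.Set.contains fs cat)) then "block"
      else if l = [] then worst else "flag" := by
  induction l with
  | nil => intro worst _; simp [pvLoopA]
  | cons cat rest ih =>
    intro worst hw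
    simp only [pvLoopA, List.any_cons]
    by_cases hb : cat ∈ bs
    · simp [hb]
    · by_cases hf : cat ∈ fs
      · rcases hw with h | h <;> subst h <;>
          simp [hb, hf, ih "flag" (Or.inr rfl)]
      · by_cases hd : cat ∈ pvDefaultBlock
        · simp [hb, hf, hd]
        · rcases hw with h | h <;> subst h <;>
            simp [hb, hf, hd, ih "flag" (Or.inr rfl)]

-- the per-element blocking test of A matches membership in B's effective blocking set
theorem pvAny_iff_inter_ne (findings : List String) (bs fs : List String) :
    (findings.any (fun cat =>
        PySem.Set.contains (PySem.Set.ofList bs) cat ||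
        (pvDefaultBlock.contains cat && !PySem.Set.contains (PySem.Set.ofList fs) cat)) = true)
    ↔ PySem.Set.inter (PySem.Set.ofList findings)
        (PySem.Set.union (PySem.Set.ofList bs)
          (PySem.Set.diff (PySem.Set.ofList pvDefaultBlock) (PySem.Set.ofList fs))) ≠ [] := by
  rw [← List.isEmpty_eq_false_iff, List.isEmpty_eq_false_iff_exists_mem]
  simp only [List.any_eq_true, Bool.or_eq_true, Bool.and_eq_true, Bool.not_eq_true',
    PySem.Set.mem_inter, PySem.Set.mem_union, PySem.Set.mem_diff, PySem.Set.mem_ofList]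
  constructor
  · rintro ⟨cat, hmem, h⟩
    refine ⟨cat, hmem, ?_⟩
    rcases h with h | ⟨h1, h2⟩
    · exact Or.inl (by simpa [PySem.Set.contains_iff, PySem.Set.mem_ofList] using h)
    · exact Or.inr ⟨by simpa using h1,
        by simpa [PySem.Set.contains_iff, PySem.Set.mem_ofList] using h2⟩
  · rintro ⟨cat, hmem, h⟩
    refine ⟨cat, hmem, ?_⟩
    rcases h with h | ⟨h1, h2⟩
    · exact Or.inl (by simpa [PySem.Set.contains_iff, PySem.Set.mem_ofList] using h)
    · exact Or.inr ⟨by simpa using h1,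
        by simpa [PySem.Set.contains_iff, PySem.Set.mem_ofList] using h2⟩

-- ===== VERDICT =====
theorem verdict_for_py_spec : Claim_equal_verdict_for_py := by
  intro findings bo fo _
  unfold Spec_verdict_for_py verdict_for_py verdict_for_py_alt
  by_cases h : findings = []
  · simp [h]
  · simp only [h, if_false, ne_eq]
    rw [pvLoopA_eq _ _ _ "pass" (Or.inl rfl)]
    by_cases hany : findings.any (fun cat =>
        PySem.Set.contains (PySem.Set.ofList (bo.getD [])) cat ||
        (pvDefaultBlock.contains cat && !PySem.Set.contains (PySem.Set.ofList (fo.getD [])) cat)) = true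
    · rw [if_pos hany, if_pos ((pvAny_iff_inter_ne _ _ _).mp hany)]
    · rw [if_neg hany, if_neg (fun hne => hany ((pvAny_iff_inter_ne _ _ _).mpr hne)), if_neg h]
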